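-- pv_equiv track=rewrite | github.com/sozgur/Exercises | python-ds-practice/fs_1_is_odd_string/is_odd_string.py | is_odd_string
-- ===== SOURCE A (Python) =====
-- def is_odd_string(word):
--     """Is the sum of the character-positions odd?
--
--     Word is a simple word of uppercase/lowercase letters without punctuation.
--
--     For each character, find it's "character position" ("a"=1, "b"=2, etc).
--     Return True/False, depending on whether sum of those numbers is odd.
--
--     For example, these sum to 1, which is odd:
--
--         >>> is_odd_string('a')
--         True
--
--         >>> is_odd_string('A')
--         True
--
--     These sum to 4, which is not odd:
--
--         >>> is_odd_string('aaaa')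
--         False
--
--         >>> is_odd_string('AAaa')
--         False
--
--     Longer example:
--
--         >>> is_odd_string('amazing')
--         True
--     """
--
--     # Hint: you may find the ord() function useful here
--
--     dict_word = {}
--
--     for w in word:
--         dict_word[w] = dict_word.get(w, 0) + 1
--
--     total = 0
--     for k,v in dict_word.items():
--         if v % 2 != 0 or ord(k) % 2 != 0:
--             total += ord(k) * v
--
--     return total % 2 == 1
-- ===== SOURCE B (Python) =====
-- def is_odd_string(word):
--     """Is the sum of the character-positions odd?"""
--     # Parity of the position sum equals parity of the ord sum (offsets 64/96 are even),
--     # so one linear pass over the characters suffices.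
--     return sum(ord(c) for c in word) % 2 == 1
-- ===== Notes on version B (the rewrite author's own statement) =====
-- stated objective: simpler
-- what changed: Drops A's frequency dictionary and its per-distinct-character conditional sum entirely: B returns the parity of the plain sum of ord(c) over the characters in one pass (the skipped even terms and the even alphabet offset never change parity).
import Mathlib
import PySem

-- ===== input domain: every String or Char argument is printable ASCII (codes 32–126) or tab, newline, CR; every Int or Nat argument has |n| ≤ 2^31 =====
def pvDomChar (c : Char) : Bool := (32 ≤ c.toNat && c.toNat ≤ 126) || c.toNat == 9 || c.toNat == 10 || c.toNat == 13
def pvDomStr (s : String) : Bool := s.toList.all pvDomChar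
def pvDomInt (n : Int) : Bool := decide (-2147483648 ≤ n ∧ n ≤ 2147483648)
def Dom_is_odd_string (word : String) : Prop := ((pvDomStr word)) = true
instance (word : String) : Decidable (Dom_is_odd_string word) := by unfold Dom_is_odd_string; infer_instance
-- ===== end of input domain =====

-- B replaces A's frequency dictionary + conditional sum with a single-pass ord-sum parity (objective: simpler).


-- ===== PORT A =====
def is_odd_string (word : String) : Bool :=
  let dict_word := word.toList.foldl (fun d w => d.insert w (d.getD w 0 + 1))
    (PySem.Dict.empty : PySem.Dict Char Int)
  let total := dict_word.items.foldl (fun total kv =>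
      if PySem.Int.mod kv.2 2 ≠ 0 ∨ PySem.Int.mod ((kv.1.toNat : Int)) 2 ≠ 0
      then total + (kv.1.toNat : Int) * kv.2 else total) 0
  PySem.Int.mod total 2 == 1

-- ===== PORT B =====
def is_odd_string_alt (word : String) : Bool :=
  PySem.Int.mod ((word.toList.map (fun c => (c.toNat : Int))).sum) 2 == 1

-- ===== PRECONDITION & SPEC =====
def Spec_is_odd_string (word : String) (out : Bool) : Prop := out = is_odd_string_alt word
instance (word : String) (out : Bool) : Decidable (Spec_is_odd_string word out) := by unfold Spec_is_odd_string; infer_instance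

-- ===== CLAIM (what is proved, stated in full; the proofs are below) =====
def Claim_equal_is_odd_string : Prop := ∀ (word : String), Dom_is_odd_string word → Spec_is_odd_string word (is_odd_string word)

-- ===== LEMMAS AND PROOFS =====

-- A's conditional foldl has the same parity as the unconditional sum of ord*count:
-- the terms it skips (even count AND even ord) are even.
lemma foldl_if_parity (ps : List (Char × Int)) (t : Int) :
    PySem.Int.mod (ps.foldl (fun total kv =>
      if PySem.Int.mod kv.2 2 ≠ 0 ∨ PySem.Int.mod ((kv.1.toNat : Int)) 2 ≠ 0
      then total + (kv.1.toNat : Int) * kv.2 else total) t) 2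
    = PySem.Int.mod (t + (ps.map (fun p => (p.1.toNat : Int) * p.2)).sum) 2 := by
  induction ps generalizing t with
  | nil => simp
  | cons p ps ih =>
    simp only [List.foldl_cons, List.map_cons, List.sum_cons]
    rw [ih]
    simp only [PySem.Int.mod_eq_emod_of_pos (by norm_num : (0:Int) < 2)]
    split_ifs with h
    · ring_nf
    · rw [not_or, not_ne_iff, not_ne_iff] at h
      obtain ⟨h1, h2⟩ := h
      have hd : (2 : Int) ∣ (p.1.toNat : Int) * p.2 :=
        Dvd.dvd.mul_left (Int.dvd_of_emod_eq_zero h1) _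
      omega

-- Summing ord*count over the distinct characters equals summing ord over all characters.
lemma sum_distinct_mul_count (l : List Char) :
    ((PySem.Set.ofList l).map (fun k => (k.toNat : Int) * (l.count k : Int))).sum
    = (l.map (fun c => (c.toNat : Int))).sum := by
  have hfin : (PySem.Set.ofList l).toFinset = l.toFinset := by
    ext x; simp [PySem.Set.mem_ofList]
  rw [← List.sum_toFinset _ (PySem.Set.nodup_ofList l), hfin,
    Finset.sum_list_map_count l (fun c => (c.toNat : Int))]
  apply Finset.sum_congr rfl
  intro x _
  simp [mul_comm]

-- ===== VERDICT (by name: the statement is the Claim_ definition above) =====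
theorem is_odd_string_spec : Claim_equal_is_odd_string := by
  intro word _
  show is_odd_string word = is_odd_string_alt word
  unfold is_odd_string is_odd_string_alt
  simp only [PySem.Dict.foldl_insert_getD_add_one_eq_counter, foldl_if_parity,
    PySem.Dict.items_counter, List.map_map, Function.comp_def, zero_add,
    sum_distinct_mul_count]
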